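-- pv_equiv track=rewrite | github.com/fzdy1914/leetcode | smart/2306-naming-a-company.py | distinctNames
-- ===== SOURCE A (Python) =====
-- from typing import List
--
-- def distinctNames(ideas: List[str]) -> int:
--     d = dict()
--     for i in ideas:
--         if i[0] in d:
--             d[i[0]].add(i[1:])
--         else:
--             d[i[0]] = {i[1:]}
--
--     l = list(d.items())
--
--     n = 0
--
--     for i in range(1, len(l)):
--         for j in range(i):
--             left = l[i][1]
--             right = l[j][1]
--
--             ll = left - right
--             rr = right - left
--             n += 2 * len(ll) * len(rr)
--
--     return n
-- ===== SOURCE B (Python) =====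
-- def distinctNames(ideas):
--     # Brute force over distinct ideas: count ordered pairs (x, y) of distinct
--     # ideas whose first letters differ and whose letter-swapped forms are both
--     # absent from the idea set.
--     u = set(ideas)
--     n = 0
--     for x in u:
--         for y in u:
--             if x[0] != y[0] and y[0] + x[1:] not in u and x[0] + y[1:] not in u:
--                 n += 1
--     return n
-- ===== Notes on version B (the rewrite author's own statement) =====
-- stated objective: alternative
-- what changed: Replaces A's dict-of-suffix-sets grouped by first letter with per-group-pair set differences by a direct brute-force count over ordered pairs of distinct ideas, testing whether the two letter-swapped names are absent from the idea set.
import Mathlib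
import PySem

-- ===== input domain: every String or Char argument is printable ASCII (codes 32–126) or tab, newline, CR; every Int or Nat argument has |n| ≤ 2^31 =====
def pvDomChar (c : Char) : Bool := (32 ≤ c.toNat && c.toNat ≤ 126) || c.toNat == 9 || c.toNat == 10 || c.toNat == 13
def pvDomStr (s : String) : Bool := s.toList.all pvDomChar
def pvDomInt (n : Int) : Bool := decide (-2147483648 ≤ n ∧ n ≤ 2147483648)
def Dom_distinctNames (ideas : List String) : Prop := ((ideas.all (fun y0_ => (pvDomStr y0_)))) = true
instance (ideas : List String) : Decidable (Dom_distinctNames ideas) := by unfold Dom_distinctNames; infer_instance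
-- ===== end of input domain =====

-- B replaces A's group-by-first-letter pass with set-difference arithmetic by a
-- brute-force count over ordered pairs of distinct ideas with two membership
-- tests (objective: alternative algorithm, not faster).

-- ===== PORT A =====
-- the loop 'for i in ideas: d[i[0]].add(i[1:]) / d[i[0]] = {i[1:]}'
-- (i[0]/i[1:] read as head/tail of i.toList; the [] case is Python's IndexError, excluded by Pre_)
def pvStepA (d : PySem.Dict Char (PySem.Set String)) (i : String) : PySem.Dict Char (PySem.Set String) :=
  match i.toList with
  | [] => d
  | c :: rest =>
    if d.contains c then
      d.modify c PySem.Set.empty (fun s => PySem.Set.add s (String.ofList rest))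
    else
      d.insert c (PySem.Set.ofList [String.ofList rest])

def distinctNames (ideas : List String) : Int :=
  let d := ideas.foldl pvStepA PySem.Dict.empty
  let l := d.items
  (PySem.List.pyRange 1 (PySem.List.len l) 1).foldl (fun n i =>
    (PySem.List.pyRange 0 i 1).foldl (fun n j =>
      let left := (PySem.List.pyGetD l i ('?', PySem.Set.empty)).2
      let right := (PySem.List.pyGetD l j ('?', PySem.Set.empty)).2
      let ll := PySem.Set.diff left right
      let rr := PySem.Set.diff right left
      n + 2 * PySem.Set.len ll * PySem.Set.len rr) n) 0

-- ===== PORT B =====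
-- the test 'x[0] != y[0] and y[0] + x[1:] not in u and x[0] + y[1:] not in u'
-- (x[0]/x[1:] read as head/tail; the [] cases are Python's IndexError, excluded by Pre_)
def pvGood (u : List String) (x y : String) : Bool :=
  match x.toList, y.toList with
  | a :: s, b :: t =>
      decide (a ≠ b) && !(u.contains (String.ofList (b :: s))) && !(u.contains (String.ofList (a :: t)))
  | _, _ => false

def distinctNames_alt (ideas : List String) : Int :=
  let u := PySem.Set.ofList ideas
  u.foldl (fun n x => u.foldl (fun n y => if pvGood u x y then n + 1 else n) n) 0

-- ===== PRECONDITION & SPEC =====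
-- Pre_ excludes lists containing the empty string, on which A (and B) raise IndexError at i[0].
def Pre_distinctNames (ideas : List String) : Prop := ∀ i ∈ ideas, i ≠ ""
instance (ideas : List String) : Decidable (Pre_distinctNames ideas) := by unfold Pre_distinctNames; infer_instance
def pvWitness_distinctNames : List String := ["coffee", "donuts", "time", "toffee"]

def Spec_distinctNames (ideas : List String) (out : Int) : Prop := out = distinctNames_alt ideas
instance (ideas : List String) (out : Int) : Decidable (Spec_distinctNames ideas out) := by unfold Spec_distinctNames; infer_instance

-- ===== CLAIM (what is proved, stated in full; the proofs are below) =====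
def Claim_equal_distinctNames : Prop := ∀ (ideas : List String), Dom_distinctNames ideas → Pre_distinctNames ideas → Spec_distinctNames ideas (distinctNames ideas)

-- ===== LEMMAS AND PROOFS =====

-- pvS c: the suffix set stored under first letter c; pvK: the letters in insertion order;
-- pvEmb a t: the idea with first letter a and suffix t; pvDD: A's per-letter-pair contribution
def pvS (ideas : List String) (c : Char) : PySem.Set String :=
  (ideas.foldl pvStepA PySem.Dict.empty).getD c PySem.Set.empty
def pvK (ideas : List String) : List Char := (ideas.foldl pvStepA PySem.Dict.empty).keys
def pvEmb (a : Char) (t : String) : String := String.ofList (a :: t.toList)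
def pvDD (ideas : List String) (a b : Char) : Int :=
  PySem.Set.len (PySem.Set.diff (pvS ideas a) (pvS ideas b)) *
  PySem.Set.len (PySem.Set.diff (pvS ideas b) (pvS ideas a))
def pvDl (l : List (Char × PySem.Set String)) (i j : ℕ) : Int :=
  PySem.Set.len (PySem.Set.diff (l.getD i ('?', PySem.Set.empty)).2 (l.getD j ('?', PySem.Set.empty)).2) *
  PySem.Set.len (PySem.Set.diff (l.getD j ('?', PySem.Set.empty)).2 (l.getD i ('?', PySem.Set.empty)).2)
def pvW (ideas : List String) : List String :=
  (pvK ideas).flatMap (fun a => (pvS ideas a).map (pvEmb a))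

lemma pv_step_getD (d : PySem.Dict Char (PySem.Set String)) (i : String) (c : Char) (t : String) :
    t ∈ (pvStepA d i).getD c PySem.Set.empty ↔
      t ∈ d.getD c PySem.Set.empty ∨ i.toList = c :: t.toList := by
  have hts : ∀ rest : List Char, t = String.ofList rest ↔ rest = t.toList := by
    intro rest
    constructor
    · intro h; rw [h, String.toList_ofList]
    · intro h; rw [h, String.ofList_toList]
  rcases hi : i.toList with _ | ⟨c', rest⟩
  · simp [pvStepA, hi]
  · simp only [pvStepA, hi]
    by_cases hc : d.contains c'
    · simp only [hc, if_true]
      rw [PySem.Dict.getD_modify]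
      by_cases hcc : c = c'
      · subst hcc
        simp [PySem.Set.mem_add, hts]
      · simp [hcc, Ne.symm hcc]
    · simp only [hc, if_false, Bool.false_eq_true]
      rw [PySem.Dict.getD_insert]
      by_cases hcc : c = c'
      · subst hcc
        rw [PySem.Dict.getD_of_not_contains d _ (by simp [hc])]
        simp [PySem.Set.mem_ofList, hts]
      · simp [hcc, Ne.symm hcc]

lemma pv_fold_getD (l : List String) (d : PySem.Dict Char (PySem.Set String)) (c : Char) (t : String) :
    t ∈ (l.foldl pvStepA d).getD c PySem.Set.empty ↔
      t ∈ d.getD c PySem.Set.empty ∨ ∃ i ∈ l, i.toList = c :: t.toList := by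
  induction l generalizing d with
  | nil => simp
  | cons i l ih =>
      rw [List.foldl_cons, ih, pv_step_getD]
      simp only [List.mem_cons]
      constructor
      · rintro ((h | h) | ⟨j, hj, hjl⟩)
        · exact Or.inl h
        · exact Or.inr ⟨i, Or.inl rfl, h⟩
        · exact Or.inr ⟨j, Or.inr hj, hjl⟩
      · rintro (h | ⟨j, (rfl | hj), hjl⟩)
        · exact Or.inl (Or.inl h)
        · exact Or.inl (Or.inr hjl)
        · exact Or.inr ⟨j, hj, hjl⟩

lemma pv_mem_S (ideas : List String) (c : Char) (t : String) :
    t ∈ pvS ideas c ↔ String.ofList (c :: t.toList) ∈ ideas := by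
  rw [pvS, pv_fold_getD]
  simp only [PySem.Dict.getD_empty]
  constructor
  · rintro (h | ⟨i, hi, hil⟩)
    · simp at h
    · rwa [← String.ofList_toList (s := i), hil] at hi
  · intro h
    exact Or.inr ⟨_, h, by rw [String.toList_ofList]⟩

lemma pv_step_nodup (d : PySem.Dict Char (PySem.Set String)) (i : String)
    (h : ∀ c, (d.getD c PySem.Set.empty).Nodup) (c : Char) :
    ((pvStepA d i).getD c PySem.Set.empty).Nodup := by
  rcases hi : i.toList with _ | ⟨c', rest⟩
  · simpa [pvStepA, hi] using h c
  · simp only [pvStepA, hi]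
    by_cases hc : d.contains c'
    · simp only [hc, if_true]
      rw [PySem.Dict.getD_modify]
      by_cases hcc : c = c'
      · subst hcc; rw [if_pos rfl]; exact PySem.Set.nodup_add _ _ (h c)
      · simp only [hcc, if_false]; exact h c
    · simp only [hc, if_false, Bool.false_eq_true]
      rw [PySem.Dict.getD_insert]
      by_cases hcc : c = c'
      · rw [if_pos hcc]; exact PySem.Set.nodup_ofList _
      · simp only [hcc, if_false]; exact h c

lemma pv_nodup_S (ideas : List String) (c : Char) : (pvS ideas c).Nodup := by
  rw [pvS]
  have : ∀ (l : List String) (d : PySem.Dict Char (PySem.Set String)),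
      (∀ c, (d.getD c PySem.Set.empty).Nodup) →
      ∀ c, ((l.foldl pvStepA d).getD c PySem.Set.empty).Nodup := by
    intro l
    induction l with
    | nil => intro d h c; simpa using h c
    | cons i l ih => intro d h c; exact ih _ (pv_step_nodup d i h) c
  exact this ideas _ (by intro c; simp [PySem.Dict.getD_empty]) c

lemma pv_nodup_K (ideas : List String) : (pvK ideas).Nodup := by
  rw [pvK]
  have : ∀ (l : List String) (d : PySem.Dict Char (PySem.Set String)),
      d.keys.Nodup → (l.foldl pvStepA d).keys.Nodup := by
    intro l
    induction l with
    | nil => intro d h; simpa using h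
    | cons i l ih =>
        intro d h
        refine ih _ ?_
        rcases hi : i.toList with _ | ⟨c', rest⟩
        · simpa [pvStepA, hi] using h
        · simp only [pvStepA, hi]
          by_cases hc : d.contains c'
          · rw [if_pos hc]
            have := PySem.Dict.keys_modify d c' PySem.Set.empty
              (fun s => PySem.Set.add s (String.ofList rest))
            rw [this, PySem.Dict.keys_insert_of_contains d _ hc]
            exact h
          · rw [if_neg (by simp [hc])]
            rw [PySem.Dict.keys_insert_of_not_contains d _ (by simpa using hc)]
            have hnm : c' ∉ d.keys := fun hm => by
              rw [(PySem.Dict.contains_iff_mem_keys d c').mpr hm] at hc; simp at hc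
            simp only [List.nodup_append, List.nodup_singleton, true_and]
            refine ⟨h, ?_⟩
            intro a ha
            simp only [List.mem_singleton, forall_eq]
            intro heq
            rw [heq] at ha
            exact hnm ha
  exact this ideas _ PySem.Dict.nodup_keys_empty

lemma pv_mem_K_of_mem_S (ideas : List String) (c : Char) (t : String)
    (h : t ∈ pvS ideas c) : c ∈ pvK ideas := by
  by_contra hm
  have hc : (ideas.foldl pvStepA PySem.Dict.empty).contains c = false := by
    rcases Bool.eq_false_or_eq_true ((ideas.foldl pvStepA PySem.Dict.empty).contains c) with h' | h'
    · exact absurd ((PySem.Dict.contains_iff_mem_keys _ c).mp h') hm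
    · exact h'
  rw [pvS, PySem.Dict.getD_of_not_contains _ _ hc] at h
  simp [PySem.Set.empty] at h

lemma pv_tri_square (n : ℕ) (D : ℕ → ℕ → Int) (hs : ∀ i j, D i j = D j i) (hd : ∀ i, D i i = 0) :
    ∑ i ∈ Finset.range n, ∑ j ∈ Finset.range i, 2 * D i j
      = ∑ i ∈ Finset.range n, ∑ j ∈ Finset.range n, D i j := by
  induction n with
  | zero => simp
  | succ m ih =>
      rw [Finset.sum_range_succ (f := fun i => ∑ j ∈ Finset.range i, 2 * D i j), ih]
      have h2 : ∀ i ∈ Finset.range m, ∑ j ∈ Finset.range (m+1), D i j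
          = (∑ j ∈ Finset.range m, D i j) + D i m := by
        intro i _; rw [Finset.sum_range_succ]
      rw [Finset.sum_range_succ (f := fun i => ∑ j ∈ Finset.range (m+1), D i j),
          Finset.sum_congr rfl h2, Finset.sum_range_succ (f := fun j => D m j), hd,
          Finset.sum_add_distrib]
      have h3 : ∑ i ∈ Finset.range m, D i m = ∑ j ∈ Finset.range m, D m j :=
        Finset.sum_congr rfl (fun i _ => hs i m)
      have h4 : ∑ j ∈ Finset.range m, 2 * D m j
          = (∑ j ∈ Finset.range m, D m j) + ∑ j ∈ Finset.range m, D m j := by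
        rw [← Finset.sum_add_distrib]; apply Finset.sum_congr rfl; intro j _; ring
      rw [h4, h3]; ring

lemma pv_sum_swap {α β : Type} (l : List α) (m : List β) (f : α → β → Int) :
    (l.map (fun a => (m.map (f a)).sum)).sum
      = (m.map (fun b => (l.map (fun a => f a b)).sum)).sum := by
  induction l with
  | nil => simp
  | cons x l ih =>
      simp only [List.map_cons, List.sum_cons, ih, PySem.List.sum_map_add_int]

lemma pv_sum_ite_const {α : Type} (l : List α) (p : α → Bool) (c : Int) :
    (l.map (fun a => if p a then c else 0)).sum = (l.countP p : Int) * c := by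
  induction l with
  | nil => simp
  | cons x l ih =>
      simp only [List.map_cons, List.sum_cons, ih, List.countP_cons]
      by_cases h : p x
      · simp [h]; ring
      · simp [h]

lemma pv_list_sum_range (n : ℕ) (f : ℕ → Int) :
    ((List.range n).map f).sum = ∑ i ∈ Finset.range n, f i := rfl

lemma pv_diff_self (s : PySem.Set String) : PySem.Set.len (PySem.Set.diff s s) = 0 := by
  have : PySem.Set.diff s s = [] := by
    rw [show (PySem.Set.diff s s) = s.filter (fun x => !(s.contains x)) from rfl,
        List.filter_eq_nil_iff]
    intro x hx; simp [List.contains_eq_mem, hx]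
  rw [this]; rfl

lemma pv_dd_diag (ideas : List String) (a : Char) : pvDD ideas a a = 0 := by
  have : PySem.Set.diff (pvS ideas a) (pvS ideas a) = [] := by
    rw [show (PySem.Set.diff (pvS ideas a) (pvS ideas a))
        = (pvS ideas a).filter (fun x => !((pvS ideas a).contains x)) from rfl]
    rw [List.filter_eq_nil_iff]
    intro x hx
    simp [List.contains_eq_mem, hx]
  rw [pvDD, this]
  simp [PySem.Set.len]

lemma pv_dl_diag (l : List (Char × PySem.Set String)) (i : ℕ) : pvDl l i i = 0 := by
  rw [pvDl, pv_diff_self]; ring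

lemma pv_A_loop (ideas : List String) :
    distinctNames ideas
      = ∑ i ∈ Finset.range ((pvK ideas).length), ∑ j ∈ Finset.range ((pvK ideas).length),
          pvDl ((ideas.foldl pvStepA PySem.Dict.empty).items) i j := by
  have h1 : ∀ k : ℕ, (1:ℤ) + (k:ℤ) = ((k+1 : ℕ) : ℤ) := by intro k; omega
  set l := (ideas.foldl pvStepA PySem.Dict.empty).items with hl
  have hlen : l.length = (pvK ideas).length := by
    rw [pvK, hl, PySem.Dict.keys, List.length_map]
  have h2 : (((l.length : ℤ)) - 1).toNat = l.length - 1 := by omega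
  rw [distinctNames]
  simp only [PySem.List.foldl_add, PySem.List.pyRange_one, PySem.List.len_eq, List.map_map,
    Function.comp_def, zero_add, sub_zero, h1, h2, PySem.List.pyGetD_natCast, Int.toNat_natCast,
    pv_list_sum_range, ← hl]
  rw [← hlen]
  have key : ∑ i ∈ Finset.range (l.length), ∑ j ∈ Finset.range i, 2 * pvDl l i j
      = ∑ k ∈ Finset.range (l.length - 1), ∑ j ∈ Finset.range (k+1), 2 * pvDl l (k+1) j := by
    rcases Nat.eq_zero_or_pos l.length with h0 | hpos
    · simp [h0]
    · obtain ⟨m, hm⟩ : ∃ m, l.length = m + 1 := ⟨l.length - 1, by omega⟩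
      rw [hm, Finset.sum_range_succ'
        (f := fun i => ∑ j ∈ Finset.range i, 2 * pvDl l i j)]
      simp
  have hpt : ∀ i j : ℕ, 2 * ((l.getD i ('?', PySem.Set.empty)).2.diff (l.getD j ('?', PySem.Set.empty)).2).len
      * ((l.getD j ('?', PySem.Set.empty)).2.diff (l.getD i ('?', PySem.Set.empty)).2).len = 2 * pvDl l i j := by
    intro i j; rw [pvDl]; ring
  simp only [hpt]
  rw [← key, pv_tri_square l.length (pvDl l)
    (fun i j => by rw [pvDl, pvDl]; ring) (pv_dl_diag l)]

lemma pv_map_sum_range {α : Type} (l : List α) (d : α) (f : α → Int) :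
    (l.map f).sum = ∑ i ∈ Finset.range l.length, f (l.getD i d) := by
  induction l with
  | nil => simp
  | cons x l ih =>
      rw [List.map_cons, List.sum_cons, List.length_cons, Finset.sum_range_succ'
        (f := fun i => f ((x :: l).getD i d))]
      simp only [List.getD_cons_succ, List.getD_cons_zero, ← ih]
      ring

lemma pv_A_eq (ideas : List String) :
    distinctNames ideas
      = ((pvK ideas).map (fun a => ((pvK ideas).map (fun b => pvDD ideas a b)).sum)).sum := by
  rw [pv_A_loop]
  have hitems : (ideas.foldl pvStepA PySem.Dict.empty).items
      = (pvK ideas).map (fun a => (a, pvS ideas a)) := by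
    rw [pvK]
    exact PySem.Dict.items_eq_map_keys _ (pv_nodup_K ideas) PySem.Set.empty
  rw [pv_map_sum_range (pvK ideas) '?' (fun a => ((pvK ideas).map (fun b => pvDD ideas a b)).sum)]
  apply Finset.sum_congr rfl
  intro i hi
  rw [pv_map_sum_range (pvK ideas) '?' (fun b => pvDD ideas ((pvK ideas).getD i '?') b)]
  apply Finset.sum_congr rfl
  intro j hj
  simp only [Finset.mem_range] at hi hj
  have hg : ∀ k : ℕ, k < (pvK ideas).length →
      ((ideas.foldl pvStepA PySem.Dict.empty).items.getD k ('?', PySem.Set.empty)).2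
        = pvS ideas ((pvK ideas).getD k '?') := by
    intro k hk
    rw [hitems, List.getD_eq_getElem _ _ (by simpa using hk), List.getElem_map,
        List.getD_eq_getElem _ _ hk]
  rw [pvDl, pvDD, hg i hi, hg j hj]

lemma pv_toList_emb (a : Char) (t : String) : (pvEmb a t).toList = a :: t.toList := by
  rw [pvEmb, String.toList_ofList]

lemma pv_mem_W (ideas : List String) (z : String) :
    z ∈ pvW ideas ↔ ∃ a t, t ∈ pvS ideas a ∧ z = pvEmb a t := by
  rw [pvW]
  simp only [List.mem_flatMap, List.mem_map]
  constructor
  · rintro ⟨a, _, t, ht, rfl⟩; exact ⟨a, t, ht, rfl⟩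
  · rintro ⟨a, t, ht, rfl⟩
    exact ⟨a, pv_mem_K_of_mem_S ideas a t ht, t, ht, rfl⟩

lemma pv_nodup_W (ideas : List String) : (pvW ideas).Nodup := by
  rw [pvW, List.nodup_flatMap]
  constructor
  · intro a _
    refine List.Nodup.map ?_ (pv_nodup_S ideas a)
    intro t t' h
    have := congrArg String.toList h
    rw [pv_toList_emb, pv_toList_emb] at this
    exact String.toList_inj.mp (by injection this)
  · have := pv_nodup_K ideas
    rw [List.nodup_iff_pairwise_ne] at this
    refine this.imp ?_
    intro a b hab z hza hzb
    simp only [List.mem_map] at hza hzb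
    obtain ⟨t, _, rfl⟩ := hza
    obtain ⟨t', _, h⟩ := hzb
    have := congrArg String.toList h
    rw [pv_toList_emb, pv_toList_emb] at this
    exact hab (by injection this with h1 _; exact h1.symm)

lemma pv_perm_W (ideas : List String) (hpre : Pre_distinctNames ideas) :
    (PySem.Set.ofList ideas).Perm (pvW ideas) := by
  rw [List.perm_ext_iff_of_nodup (PySem.Set.nodup_ofList ideas) (pv_nodup_W ideas)]
  intro z
  rw [PySem.Set.mem_ofList, pv_mem_W]
  constructor
  · intro hz
    have hne : z.toList ≠ [] := by
      intro h0
      exact hpre z hz (by rw [← String.ofList_toList (s := z), h0])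
    rcases hz' : z.toList with _ | ⟨c, rest⟩
    · exact absurd hz' hne
    · refine ⟨c, String.ofList rest, ?_, ?_⟩
      · rw [pv_mem_S, String.toList_ofList, ← hz', String.ofList_toList]
        exact hz
      · rw [pvEmb, String.toList_ofList, ← hz', String.ofList_toList]
  · rintro ⟨a, t, ht, rfl⟩
    rw [pv_mem_S] at ht
    exact ht

lemma pv_sum_flatMap {α : Type} (l : List α) (f : α → List Int) :
    (l.flatMap f).sum = (l.map (fun a => (f a).sum)).sum := by
  rw [List.flatMap, List.sum_flatten, List.map_map]; rfl

lemma pv_contains_emb (ideas : List String) (c : Char) (w : String) :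
    List.contains (PySem.Set.ofList ideas) (pvEmb c w) = decide (w ∈ pvS ideas c) := by
  rw [List.contains_eq_mem]
  apply decide_eq_decide.mpr
  rw [PySem.Set.mem_ofList, pv_mem_S, pvEmb]

lemma pv_good_emb (ideas : List String) (a b : Char) (s t : String) :
    pvGood (PySem.Set.ofList ideas) (pvEmb a s) (pvEmb b t)
      = (decide (a ≠ b) && !decide (s ∈ pvS ideas b) && !decide (t ∈ pvS ideas a)) := by
  simp only [pvGood, pv_toList_emb]
  rw [show String.ofList (b :: s.toList) = pvEmb b s from rfl,
      show String.ofList (a :: t.toList) = pvEmb a t from rfl,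
      pv_contains_emb, pv_contains_emb]

lemma pv_inner (ideas : List String) (a b : Char) :
    ((pvS ideas a).map (fun s => (List.countP
        (fun t => decide (a ≠ b) && !decide (s ∈ pvS ideas b) && !decide (t ∈ pvS ideas a))
        (pvS ideas b) : Int))).sum = pvDD ideas a b := by
  by_cases hab : a = b
  · subst hab
    simp [pv_dd_diag]
  · have hd : decide (a ≠ b) = true := by simp [hab]
    have hterm : ∀ s, (List.countP
        (fun t => decide (a ≠ b) && !decide (s ∈ pvS ideas b) && !decide (t ∈ pvS ideas a))
        (pvS ideas b) : Int)
        = if !decide (s ∈ pvS ideas b)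
          then (List.countP (fun t => !decide (t ∈ pvS ideas a)) (pvS ideas b) : Int) else 0 := by
      intro s
      by_cases hs : s ∈ pvS ideas b
      · simp [hs, hd]
      · simp [hs, hd]
    rw [List.map_congr_left (fun s _ => hterm s), pv_sum_ite_const]
    have hlen : ∀ (x y : Char), PySem.Set.len (PySem.Set.diff (pvS ideas x) (pvS ideas y))
        = (List.countP (fun t => !decide (t ∈ pvS ideas y)) (pvS ideas x) : Int) := by
      intro x y
      rw [show PySem.Set.diff (pvS ideas x) (pvS ideas y)
          = (pvS ideas x).filter (fun z => !((pvS ideas y).contains z)) from rfl]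
      rw [show PySem.Set.len ((pvS ideas x).filter (fun z => !((pvS ideas y).contains z)))
          = ((((pvS ideas x).filter (fun z => !((pvS ideas y).contains z))).length : ℕ) : Int) from rfl]
      rw [← List.countP_eq_length_filter]
      congr 1
      apply List.countP_congr
      intro z _
      simp [List.contains_eq_mem]
    rw [pvDD, hlen, hlen]

lemma pv_B_eq (ideas : List String) (hpre : Pre_distinctNames ideas) :
    distinctNames_alt ideas
      = ((pvK ideas).map (fun a => ((pvK ideas).map (fun b => pvDD ideas a b)).sum)).sum := by
  have hperm := pv_perm_W ideas hpre
  rw [distinctNames_alt]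
  simp only [PySem.List.foldl_if_add_one, PySem.List.foldl_add]
  have hcnt : ∀ x, List.countP (pvGood (PySem.Set.ofList ideas) x) (PySem.Set.ofList ideas)
      = List.countP (pvGood (PySem.Set.ofList ideas) x) (pvW ideas) :=
    fun x => hperm.countP_eq _
  simp only [hcnt]
  rw [(hperm.map (fun x => (List.countP (pvGood (PySem.Set.ofList ideas) x) (pvW ideas) : Int))).sum_eq]
  conv_lhs => rw [pvW]
  rw [List.map_flatMap, pv_sum_flatMap]
  simp only [List.map_map, Function.comp_def]
  simp only [List.countP_flatMap, List.countP_map, Function.comp_def]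
  simp only [pv_good_emb]
  push_cast
  simp only [List.map_map, Function.comp_def]
  rw [zero_add]
  apply congrArg List.sum
  apply List.map_congr_left
  intro a _
  rw [pv_sum_swap (pvS ideas a) (pvK ideas)]
  apply congrArg List.sum
  apply List.map_congr_left
  intro b _
  exact pv_inner ideas a b

-- ===== VERDICT (by name: the statement is the Claim_ definition above) =====
theorem distinctNames_spec : Claim_equal_distinctNames := by
  intro ideas _ hpre
  unfold Spec_distinctNames
  rw [pv_A_eq, pv_B_eq ideas hpre]
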